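-- pv_equiv track=rewrite | github.com/bimalvpatel/Google-Kickstart-2019 | RoundA2.py | check
-- ===== SOURCE A (Python) =====
-- def check(mid,minc,maxc,minr,maxr,pos):
--     locr = []
--     locc = []
--     if (maxr-minr)%2==0:
--         locr = [minr+(maxr-minr)//2]
--     else:
--         locr = [minr+(maxr-minr)//2,minr+(maxr-minr)//2+1]
--     if (maxc-minc) % 2==0:
--         locc = [minc+(maxc-minc)//2]
--     else:
--         locc = [minc+(maxc-minc)//2,minc+(maxc-minc)//2+1]
--     return min(max(abs(mr - r) + abs(mc - c) for r, c in pos) for mr in locr for mc in locc) <= mid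
-- ===== SOURCE B (Python) =====
-- def check(mid, minc, maxc, minr, maxr, pos):
--     # Single pass: extrema of r+c and r-c; branchless candidate centers; O(1) per candidate.
--     (r0, c0) = pos[0]
--     minS = maxS = r0 + c0
--     minD = maxD = r0 - c0
--     for r, c in pos[1:]:
--         s = r + c
--         d = r - c
--         if s < minS:
--             minS = s
--         if s > maxS:
--             maxS = s
--         if d < minD:
--             minD = d
--         if d > maxD:
--             maxD = d
--     ra = (minr + maxr) // 2
--     rb = ra + (maxr - minr) % 2
--     ca = (minc + maxc) // 2
--     cb = ca + (maxc - minc) % 2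
--
--     def far(mr, mc):
--         return max(mr + mc - minS, maxS - mr - mc, mr - mc - minD, maxD - mr + mc)
--
--     return min(far(ra, ca), far(ra, cb), far(rb, ca), far(rb, cb)) <= mid
-- ===== Notes on version B (the rewrite author's own statement) =====
-- stated objective: alternative
-- what changed: B replaces A's per-candidate rescan of pos (max of Manhattan distances recomputed for each of the up-to-4 centers) with one fold keeping the extrema of r+c and r-c in a tuple accumulator, and replaces the parity-branched candidate lists with branchless centers ((minr+maxr)//2 and it plus (maxr-minr)%2), evaluating each candidate in O(1).
import Mathlib
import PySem

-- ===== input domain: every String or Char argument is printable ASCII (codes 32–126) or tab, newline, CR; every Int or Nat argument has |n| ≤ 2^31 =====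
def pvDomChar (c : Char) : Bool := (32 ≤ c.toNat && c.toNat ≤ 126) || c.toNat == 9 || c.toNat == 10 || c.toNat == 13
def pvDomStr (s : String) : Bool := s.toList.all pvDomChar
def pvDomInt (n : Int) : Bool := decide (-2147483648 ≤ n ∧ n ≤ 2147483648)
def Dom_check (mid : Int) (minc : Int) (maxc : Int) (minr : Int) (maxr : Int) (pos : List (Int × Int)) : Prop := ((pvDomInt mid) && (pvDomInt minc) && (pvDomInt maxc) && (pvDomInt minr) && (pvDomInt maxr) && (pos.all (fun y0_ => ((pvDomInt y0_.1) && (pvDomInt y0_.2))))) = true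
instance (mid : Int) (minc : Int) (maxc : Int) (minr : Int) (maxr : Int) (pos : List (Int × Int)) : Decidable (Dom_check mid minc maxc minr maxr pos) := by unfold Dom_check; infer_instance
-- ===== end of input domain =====

-- B replaces A's per-candidate rescan of pos by ONE fold keeping (minS,maxS,minD,maxD) of r+c and
-- r-c, and replaces the parity-branched candidate lists by branchless centers; same answers, O(1) per candidate.

-- ===== PORT A =====
def check (mid : Int) (minc : Int) (maxc : Int) (minr : Int) (maxr : Int) (pos : List (Int × Int)) : Bool :=
  let locr : List Int :=
    if PySem.Int.mod (maxr - minr) 2 = 0 then [minr + PySem.Int.floordiv (maxr - minr) 2]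
    else [minr + PySem.Int.floordiv (maxr - minr) 2, minr + PySem.Int.floordiv (maxr - minr) 2 + 1]
  let locc : List Int :=
    if PySem.Int.mod (maxc - minc) 2 = 0 then [minc + PySem.Int.floordiv (maxc - minc) 2]
    else [minc + PySem.Int.floordiv (maxc - minc) 2, minc + PySem.Int.floordiv (maxc - minc) 2 + 1]
  -- inner max(...) raises ValueError on empty pos (excluded by Pre_); .getD 0 is never the value used
  match PySem.List.min? (locr.flatMap (fun mr => locc.map (fun mc =>
      (PySem.List.max? (pos.map (fun rc => |mr - rc.1| + |mc - rc.2|)) (fun x => x)).getD 0)))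
      (fun x => x) with
  | some v => decide (v ≤ mid)
  | none => false

-- ===== PORT B =====
def check_alt (mid : Int) (minc : Int) (maxc : Int) (minr : Int) (maxr : Int) (pos : List (Int × Int)) : Bool :=
  match pos with
  | [] => false  -- pos[0] raises IndexError on empty pos (excluded by Pre_)
  | (r0, c0) :: rest =>
    let e : Int × Int × Int × Int := rest.foldl (fun a rc =>
        let s := rc.1 + rc.2
        let d := rc.1 - rc.2
        ((if s < a.1 then s else a.1),
         (if s > a.2.1 then s else a.2.1),
         (if d < a.2.2.1 then d else a.2.2.1),
         (if d > a.2.2.2 then d else a.2.2.2)))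
      (r0 + c0, r0 + c0, r0 - c0, r0 - c0)
    let ra := PySem.Int.floordiv (minr + maxr) 2
    let rb := ra + PySem.Int.mod (maxr - minr) 2
    let ca := PySem.Int.floordiv (minc + maxc) 2
    let cb := ca + PySem.Int.mod (maxc - minc) 2
    let far := fun (mr mc : Int) =>
      max (max (max (mr + mc - e.1) (e.2.1 - mr - mc)) (mr - mc - e.2.2.1)) (e.2.2.2 - mr + mc)
    decide (min (min (min (far ra ca) (far ra cb)) (far rb ca)) (far rb cb) ≤ mid)

-- ===== PRECONDITION & SPEC =====
-- Pre_ excludes the empty pos list, on which A raises ValueError (max over an empty sequence; B's pos[0] raises too).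
def Pre_check (mid : Int) (minc : Int) (maxc : Int) (minr : Int) (maxr : Int) (pos : List (Int × Int)) : Prop := pos ≠ []
instance (mid : Int) (minc : Int) (maxc : Int) (minr : Int) (maxr : Int) (pos : List (Int × Int)) : Decidable (Pre_check mid minc maxc minr maxr pos) := by unfold Pre_check; infer_instance
def pvWitness_check : Int × Int × Int × Int × Int × (List (Int × Int)) := (3, 0, 2, 0, 2, [(0, 0), (2, 1)])

def Spec_check (mid : Int) (minc : Int) (maxc : Int) (minr : Int) (maxr : Int) (pos : List (Int × Int)) (out : Bool) : Prop := out = check_alt mid minc maxc minr maxr pos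
instance (mid : Int) (minc : Int) (maxc : Int) (minr : Int) (maxr : Int) (pos : List (Int × Int)) (out : Bool) : Decidable (Spec_check mid minc maxc minr maxr pos out) := by unfold Spec_check; infer_instance

-- ===== CLAIM =====
def Claim_equal_check : Prop := ∀ (mid : Int) (minc : Int) (maxc : Int) (minr : Int) (maxr : Int) (pos : List (Int × Int)), Dom_check mid minc maxc minr maxr pos → Pre_check mid minc maxc minr maxr pos → Spec_check mid minc maxc minr maxr pos (check mid minc maxc minr maxr pos)

-- ===== LEMMAS AND PROOFS =====

-- |mr-r| + |mc-c| written over the rotated coordinates r+c, r-c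
lemma abs_step (mr mc r c : Int) :
    |mr - r| + |mc - c|
      = max (max (mr + mc - (r + c)) ((r + c) - mr - mc)) (max (mr - mc - (r - c)) ((r - c) - mr + mc)) := by
  rcases abs_cases (mr - r) with ⟨h1, h2⟩ | ⟨h1, h2⟩ <;>
    rcases abs_cases (mc - c) with ⟨h3, h4⟩ | ⟨h3, h4⟩ <;> omega

lemma half_s (mr mc a b s : Int) :
    max (max (mr + mc - a) (b - mr - mc)) (max (mr + mc - s) (s - mr - mc))
      = max (mr + mc - min a s) (max b s - mr - mc) := by omega

lemma half_d (mr mc a b d : Int) :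
    max (max (mr - mc - a) (b - mr + mc)) (max (mr - mc - d) (d - mr + mc))
      = max (mr - mc - min a d) (max b d - mr + mc) := by omega

-- running max of Manhattan distances = formula over running extrema of r+c and r-c
lemma fold_eq (mr mc : Int) (t : List (Int × Int)) : ∀ (aS bS aD bD : Int),
    (t.map (fun rc => |mr - rc.1| + |mc - rc.2|)).foldl max
        (max (max (mr + mc - aS) (bS - mr - mc)) (max (mr - mc - aD) (bD - mr + mc)))
      = max (max (mr + mc - (t.map (fun rc => rc.1 + rc.2)).foldl min aS)
                 ((t.map (fun rc => rc.1 + rc.2)).foldl max bS - mr - mc))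
            (max (mr - mc - (t.map (fun rc => rc.1 - rc.2)).foldl min aD)
                 ((t.map (fun rc => rc.1 - rc.2)).foldl max bD - mr + mc)) := by
  induction t with
  | nil => intro aS bS aD bD; rfl
  | cons q t ih =>
    intro aS bS aD bD
    simp only [List.map_cons, List.foldl_cons]
    rw [abs_step, max_max_max_comm, half_s, half_d, ih]

-- B's tuple-accumulator fold computes the four componentwise extrema folds
lemma tuple_fold (t : List (Int × Int)) : ∀ (aS bS aD bD : Int),
    t.foldl (fun a rc =>
        let s := rc.1 + rc.2
        let d := rc.1 - rc.2
        ((if s < a.1 then s else a.1),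
         (if s > a.2.1 then s else a.2.1),
         (if d < a.2.2.1 then d else a.2.2.1),
         (if d > a.2.2.2 then d else a.2.2.2))) (aS, bS, aD, bD)
      = ((t.map (fun rc => rc.1 + rc.2)).foldl min aS,
         (t.map (fun rc => rc.1 + rc.2)).foldl max bS,
         (t.map (fun rc => rc.1 - rc.2)).foldl min aD,
         (t.map (fun rc => rc.1 - rc.2)).foldl max bD) := by
  induction t with
  | nil => intro aS bS aD bD; rfl
  | cons q t ih =>
    intro aS bS aD bD
    simp only [List.map_cons, List.foldl_cons]
    rw [show (if q.1 + q.2 < aS then q.1 + q.2 else aS) = min aS (q.1 + q.2) by omega,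
        show (if q.1 + q.2 > bS then q.1 + q.2 else bS) = max bS (q.1 + q.2) by omega,
        show (if q.1 - q.2 < aD then q.1 - q.2 else aD) = min aD (q.1 - q.2) by omega,
        show (if q.1 - q.2 > bD then q.1 - q.2 else bD) = max bD (q.1 - q.2) by omega]
    exact ih _ _ _ _

-- A's min over the parity-branched candidate lists equals B's branchless 4-way min, for any g
lemma cand_min (g : Int → Int → Int) (mid minc maxc minr maxr : Int) :
    (match PySem.List.min?
        ((if PySem.Int.mod (maxr - minr) 2 = 0 then [minr + PySem.Int.floordiv (maxr - minr) 2]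
          else [minr + PySem.Int.floordiv (maxr - minr) 2, minr + PySem.Int.floordiv (maxr - minr) 2 + 1]).flatMap
          (fun mr => (if PySem.Int.mod (maxc - minc) 2 = 0 then [minc + PySem.Int.floordiv (maxc - minc) 2]
            else [minc + PySem.Int.floordiv (maxc - minc) 2, minc + PySem.Int.floordiv (maxc - minc) 2 + 1]).map
            (fun mc => g mr mc)))
        (fun x => x) with
      | some v => decide (v ≤ mid)
      | none => false)
      = decide (min (min (min
            (g (PySem.Int.floordiv (minr + maxr) 2) (PySem.Int.floordiv (minc + maxc) 2))
            (g (PySem.Int.floordiv (minr + maxr) 2)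
               (PySem.Int.floordiv (minc + maxc) 2 + PySem.Int.mod (maxc - minc) 2)))
            (g (PySem.Int.floordiv (minr + maxr) 2 + PySem.Int.mod (maxr - minr) 2)
               (PySem.Int.floordiv (minc + maxc) 2)))
            (g (PySem.Int.floordiv (minr + maxr) 2 + PySem.Int.mod (maxr - minr) 2)
               (PySem.Int.floordiv (minc + maxc) 2 + PySem.Int.mod (maxc - minc) 2)) ≤ mid) := by
  have h2 : (0 : Int) < 2 := by omega
  simp only [PySem.Int.mod_eq_emod_of_pos h2, PySem.Int.floordiv_eq_ediv_of_pos h2]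
  have hA : minr + (maxr - minr) / 2 = (minr + maxr) / 2 := by omega
  have hC : minc + (maxc - minc) / 2 = (minc + maxc) / 2 := by omega
  rcases (show (maxr - minr) % 2 = 0 ∨ (maxr - minr) % 2 = 1 by omega) with hmr | hmr <;>
    rcases (show (maxc - minc) % 2 = 0 ∨ (maxc - minc) % 2 = 1 by omega) with hmc | hmc <;>
    · simp only [hmr, hmc, hA, hC, add_zero, if_pos, if_neg, one_ne_zero,
        not_false_iff, List.flatMap_cons, List.map_cons, List.map_nil,
        List.flatMap_nil, List.append_nil, List.cons_append, List.nil_append,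
        PySem.List.min?_id_cons, List.foldl_cons, List.foldl_nil] <;>
      · simp only [decide_eq_decide]
        omega

set_option maxHeartbeats 1000000 in
theorem check_spec : Claim_equal_check := by
  intro mid minc maxc minr maxr pos _ hpre
  unfold Spec_check check check_alt
  obtain ⟨⟨r0, c0⟩, t, rfl⟩ : ∃ p t, pos = p :: t := by
    cases pos with
    | nil => exact absurd rfl hpre
    | cons p t => exact ⟨p, t, rfl⟩
  simp only [tuple_fold, List.map_cons, PySem.List.max?_id_cons, Option.getD_some]
  have hinner : ∀ mr mc : Int,
      (t.map (fun rc => |mr - rc.1| + |mc - rc.2|)).foldl max (|mr - r0| + |mc - c0|)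
        = max (max (max (mr + mc - (t.map (fun rc => rc.1 + rc.2)).foldl min (r0 + c0))
                   ((t.map (fun rc => rc.1 + rc.2)).foldl max (r0 + c0) - mr - mc))
              (mr - mc - (t.map (fun rc => rc.1 - rc.2)).foldl min (r0 - c0)))
                   ((t.map (fun rc => rc.1 - rc.2)).foldl max (r0 - c0) - mr + mc) := by
    intro mr mc
    rw [abs_step mr mc r0 c0, fold_eq mr mc t]
    omega
  simp only [hinner]
  exact cand_min
    (fun mr mc => max (max (max (mr + mc - (t.map (fun rc => rc.1 + rc.2)).foldl min (r0 + c0))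
        ((t.map (fun rc => rc.1 + rc.2)).foldl max (r0 + c0) - mr - mc))
        (mr - mc - (t.map (fun rc => rc.1 - rc.2)).foldl min (r0 - c0)))
        ((t.map (fun rc => rc.1 - rc.2)).foldl max (r0 - c0) - mr + mc))
    mid minc maxc minr maxr
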